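-- pv_equiv track=rewrite | github.com/ddelpozosa/advent_of_code | 2015/days/day_03/solution.py | get_visited_houses
-- ===== SOURCE A (Python) =====
-- DEF_MOVEMENTS = {'^': (0, 1), 'v': (0, -1), '<': (-1, 0), '>': (1, 0)}
--
-- def get_visited_houses(movements):
--     houses = set()
--     position = (0, 0)
--     houses.add(position)
--     for move in movements:
--         position = (position[0] + DEF_MOVEMENTS[move][0], position[1] + DEF_MOVEMENTS[move][1])
--         houses.add(position)
--     return len(houses)
-- ===== SOURCE B (Python) =====
-- DEF_MOVEMENTS = {'^': (0, 1), 'v': (0, -1), '<': (-1, 0), '>': (1, 0)}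
--
-- def get_visited_houses(movements):
--     # pass 1: map each move to its delta (eager; KeyError on unknown chars, like A)
--     deltas = [DEF_MOVEMENTS[move] for move in movements]
--     # pass 2: prefix-sum the deltas into the full list of visited positions
--     x, y = 0, 0
--     positions = [(0, 0)]
--     for dx, dy in deltas:
--         x += dx
--         y += dy
--         positions.append((x, y))
--     # pass 3: sort, then count distinct values as 1 + number of adjacent unequal pairs
--     positions.sort()
--     return 1 + sum(1 for a, b in zip(positions, positions[1:]) if a != b)
-- ===== Notes on version B (the rewrite author's own statement) =====
-- stated objective: alternative
-- what changed: B uses no set at all: it materialises the prefix-sum list of visited positions, sorts it, and counts distinct values as 1 + the number of adjacent unequal pairs in the sorted list, instead of A's single loop inserting each position into a hash set.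
import Mathlib
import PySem

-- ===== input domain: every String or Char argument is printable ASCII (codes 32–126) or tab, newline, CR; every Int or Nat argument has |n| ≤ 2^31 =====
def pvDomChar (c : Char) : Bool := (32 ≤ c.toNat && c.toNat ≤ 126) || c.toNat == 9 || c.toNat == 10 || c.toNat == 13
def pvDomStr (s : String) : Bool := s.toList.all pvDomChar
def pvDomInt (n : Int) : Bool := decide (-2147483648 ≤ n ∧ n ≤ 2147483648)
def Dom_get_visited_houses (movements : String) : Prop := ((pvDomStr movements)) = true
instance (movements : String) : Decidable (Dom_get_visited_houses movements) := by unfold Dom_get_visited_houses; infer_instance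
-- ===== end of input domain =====

-- B removes the set entirely: it builds the prefix-sum position list, sorts it, and
-- counts distinct values as 1 + adjacent unequal pairs (alternative algorithm, same result).

-- ===== PORT A =====
def defMovements : PySem.Dict Char (Int × Int) :=
  PySem.Dict.ofList [('^', (0, 1)), ('v', (0, -1)), ('<', (-1, 0)), ('>', (1, 0))]

-- DEF_MOVEMENTS[move] raises KeyError on unknown chars; Pre_ excludes those inputs,
-- so the getD default (0,0) is never reached on claimed inputs.
def get_visited_houses (movements : String) : Int :=
  movements.toList.foldl
    (fun (st : PySem.Set (Int × Int) × (Int × Int)) (move : Char) =>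
      let d := PySem.Dict.getD defMovements move (0, 0)
      let position := (st.2.1 + d.1, st.2.2 + d.2)
      (PySem.Set.add st.1 position, position))
    (PySem.Set.add PySem.Set.empty ((0, 0) : Int × Int), ((0, 0) : Int × Int))
  |>.1.length

-- ===== PORT B =====
def get_visited_houses_alt (movements : String) : Int :=
  -- pass 1: map moves to deltas (KeyError excluded by Pre_, as in port A)
  let deltas := movements.toList.map (fun move => PySem.Dict.getD defMovements move (0, 0))
  -- pass 2: prefix-sum into the full list of visited positions
  let scan := deltas.foldl
    (fun (st : (Int × Int) × List (Int × Int)) d =>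
      let p := (st.1.1 + d.1, st.1.2 + d.2)
      (p, st.2 ++ [p]))
    (((0, 0) : Int × Int), [((0, 0) : Int × Int)])
  -- pass 3: positions.sort() (Python tuple order = sorted2 on the two components),
  -- then 1 + sum(1 for a, b in zip(positions, positions[1:]) if a != b)
  let ps := PySem.List.sorted2 scan.2 (fun p => p.1) (fun p => p.2)
  1 + (ps.zip (ps.drop 1)).foldl
        (fun (c : Int) (ab : (Int × Int) × (Int × Int)) =>
          if ab.1 ≠ ab.2 then c + 1 else c) 0

-- ===== PRECONDITION & SPEC =====
-- Pre_: every character is a known move; on any other char Python A raises KeyError.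
def Pre_get_visited_houses (movements : String) : Prop :=
  (movements.toList.all (fun c => c == '^' || c == 'v' || c == '<' || c == '>')) = true
instance (movements : String) : Decidable (Pre_get_visited_houses movements) := by
  unfold Pre_get_visited_houses; infer_instance
def pvWitness_get_visited_houses : String := "^v<>^"

def Spec_get_visited_houses (movements : String) (out : Int) : Prop := out = get_visited_houses_alt movements
instance (movements : String) (out : Int) : Decidable (Spec_get_visited_houses movements out) := by unfold Spec_get_visited_houses; infer_instance

-- ===== CLAIM (what is proved, stated in full; the proofs are below) =====
def Claim_equal_get_visited_houses : Prop := ∀ (movements : String), Dom_get_visited_houses movements → Pre_get_visited_houses movements → Spec_get_visited_houses movements (get_visited_houses movements)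

-- ===== LEMMAS AND PROOFS =====

-- the list of positions reached from p after each delta of ds, in order
def pvGen : Int × Int → List (Int × Int) → List (Int × Int)
  | _, [] => []
  | p, d :: ds =>
      let q := (p.1 + d.1, p.2 + d.2)
      q :: pvGen q ds

-- Python's strict comparison on pairs of ints (the order sorted2 uses)
def pvLt (a b : Int × Int) : Bool :=
  decide (a.1 < b.1) || (!decide (b.1 < a.1) && decide (a.2 < b.2))

theorem pvLt_asymm {a b : Int × Int} (h : pvLt a b = true) : pvLt b a = false := by
  simp [pvLt] at *; omega

theorem pvLt_trans {a b c : Int × Int} (h1 : pvLt a b = true) (h2 : pvLt b c = true) :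
    pvLt a c = true := by
  simp [pvLt] at *; omega

theorem pvLt_total {a b : Int × Int} (h1 : pvLt a b = false) (h2 : pvLt b a = false) :
    a = b := by
  simp [pvLt] at *
  have : a.1 = b.1 ∧ a.2 = b.2 := by omega
  exact Prod.ext this.1 this.2

-- x ≤ y in the non-strict order
def pvLe (a b : Int × Int) : Prop := pvLt b a = false

theorem pvLe_of_lt {a b : Int × Int} (h : pvLt a b = true) : pvLe a b := pvLt_asymm h

theorem pvLt_of_le_of_ne {a b : Int × Int} (h : pvLe a b) (hne : a ≠ b) : pvLt a b = true := by
  cases hlt : pvLt a b with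
  | true => rfl
  | false => exact absurd (pvLt_total hlt h) hne

theorem pvLe_trans {a b c : Int × Int} (h1 : pvLe a b) (h2 : pvLe b c) : pvLe a c := by
  unfold pvLe at *
  cases h : pvLt c a with
  | false => rfl
  | true =>
      cases hab : pvLt a b with
      | false =>
          have := pvLt_total hab h1
          subst this; exact h ▸ h2
      | true =>
          have := pvLt_trans h hab
          exact absurd h2 (by simp [this])

-- insertBy with pvLt keeps the list pairwise-pvLe
theorem pairwise_insertBy (x : Int × Int) (acc : List (Int × Int))
    (hacc : acc.Pairwise pvLe) :
    (PySem.List.insertBy pvLt x acc).Pairwise pvLe := by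
  induction acc with
  | nil => simp [PySem.List.insertBy]
  | cons y ys ih =>
      rw [List.pairwise_cons] at hacc
      obtain ⟨hy, hys⟩ := hacc
      by_cases h : pvLt x y = true
      · rw [show PySem.List.insertBy pvLt x (y :: ys) = x :: y :: ys by
            simp [PySem.List.insertBy, h]]
        refine List.Pairwise.cons ?_ (List.Pairwise.cons hy hys)
        intro z hz
        rcases List.mem_cons.mp hz with rfl | hz
        · exact pvLe_of_lt h
        · exact pvLe_trans (pvLe_of_lt h) (hy z hz)
      · rw [show PySem.List.insertBy pvLt x (y :: ys) = y :: PySem.List.insertBy pvLt x ys by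
            simp [PySem.List.insertBy, h]]
        refine List.Pairwise.cons ?_ (ih hys)
        intro z hz
        rcases (PySem.List.mem_insertBy _ _ _ _).mp hz with rfl | hz
        · simp only [pvLe]; simpa using h
        · exact hy z hz

theorem pairwise_foldl_insertBy (xs : List (Int × Int)) :
    ∀ acc : List (Int × Int), acc.Pairwise pvLe →
    (xs.foldl (fun acc x => PySem.List.insertBy pvLt x acc) acc).Pairwise pvLe := by
  induction xs with
  | nil => intro acc h; exact h
  | cons x xs ih => intro acc h; exact ih _ (pairwise_insertBy x acc h)

theorem sorted2_eq_foldl (xs : List (Int × Int)) :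
    PySem.List.sorted2 xs (fun p => p.1) (fun p => p.2)
      = xs.foldl (fun acc x => PySem.List.insertBy pvLt x acc) [] := rfl

theorem pairwise_sorted2 (xs : List (Int × Int)) :
    (PySem.List.sorted2 xs (fun p => p.1) (fun p => p.2)).Pairwise pvLe := by
  rw [sorted2_eq_foldl]
  exact pairwise_foldl_insertBy xs [] List.Pairwise.nil

-- the recursive boundary count behind B's zip/fold
def pvBCount : List (Int × Int) → Int
  | [] => 0
  | [_] => 0
  | x :: y :: t => (if x ≠ y then 1 else 0) + pvBCount (y :: t)

theorem pvZipFold (ps : List (Int × Int)) :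
    ∀ c : Int,
    (ps.zip (ps.drop 1)).foldl
      (fun (c : Int) (ab : (Int × Int) × (Int × Int)) =>
        if ab.1 ≠ ab.2 then c + 1 else c) c
      = c + pvBCount ps := by
  induction ps with
  | nil => intro c; simp [pvBCount]
  | cons x t ih =>
      intro c
      cases t with
      | nil => simp [pvBCount]
      | cons y t' =>
          simp only [List.drop] at ih
          simp only [List.drop, List.zip_cons_cons, List.foldl]
          rw [ih]
          by_cases h : x = y <;> simp [pvBCount, h] <;> ring

-- for a pairwise-pvLe (i.e. sorted) nonempty list, 1 + boundaries = number of distinct values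
theorem pvBCount_sorted (ps : List (Int × Int)) (hne : ps ≠ [])
    (hs : ps.Pairwise pvLe) :
    1 + pvBCount ps = (ps.toFinset.card : Int) := by
  induction ps with
  | nil => exact absurd rfl hne
  | cons x t ih =>
      cases t with
      | nil => simp [pvBCount]
      | cons y t' =>
          rw [List.pairwise_cons] at hs
          obtain ⟨hx, ht⟩ := hs
          by_cases hxy : x = y
          · subst hxy
            have : (x :: x :: t').toFinset = (x :: t').toFinset := by
              simp [List.toFinset_cons]
            rw [this, show pvBCount (x :: x :: t') = pvBCount (x :: t') by
                  simp [pvBCount]]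
            exact ih (by simp) ht
          · have hlt : pvLt x y = true := pvLt_of_le_of_ne (hx y (by simp)) hxy
            have hnotin : x ∉ (y :: t') := by
              intro hmem
              rcases List.mem_cons.mp hmem with rfl | hmem
              · exact hxy rfl
              · rw [List.pairwise_cons] at ht
                have hyx : pvLe y x := ht.1 x hmem
                exact absurd hlt (by simp [pvLe] at hyx; simp [hyx])
            rw [show pvBCount (x :: y :: t') = 1 + pvBCount (y :: t') by
                  simp [pvBCount, hxy]]
            rw [List.toFinset_cons, Finset.card_insert_of_notMem (by simpa using hnotin)]
            push_cast
            rw [← ih (by simp) ht]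
            ring

-- fold shape of port A: the set built is Set.ofList of origin :: generated positions
theorem pvA_fold (cs : List Char) :
    ∀ (s : PySem.Set (Int × Int)) (p : Int × Int),
    cs.foldl
      (fun (st : PySem.Set (Int × Int) × (Int × Int)) (move : Char) =>
        let d := PySem.Dict.getD defMovements move (0, 0)
        let position := (st.2.1 + d.1, st.2.2 + d.2)
        (PySem.Set.add st.1 position, position)) (s, p)
      = ((pvGen p (cs.map (fun move => PySem.Dict.getD defMovements move (0, 0)))).foldl
           PySem.Set.add s,
         (pvGen p (cs.map (fun move => PySem.Dict.getD defMovements move (0, 0)))).getLastD p) := by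
  induction cs with
  | nil => intro s p; simp [pvGen]
  | cons c cs ih =>
      intro s p
      simp only [List.foldl, List.map, pvGen]
      rw [ih]
      cases h : pvGen (p.1 + (PySem.Dict.getD defMovements c (0, 0)).1,
                       p.2 + (PySem.Dict.getD defMovements c (0, 0)).2)
                     (cs.map (fun move => PySem.Dict.getD defMovements move (0, 0))) <;>
        simp [List.getLastD]

theorem pvB_fold (ds : List (Int × Int)) :
    ∀ (p : Int × Int) (acc : List (Int × Int)),
    (ds.foldl
      (fun (st : (Int × Int) × List (Int × Int)) d =>
        let q := (st.1.1 + d.1, st.1.2 + d.2)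
        (q, st.2 ++ [q])) (p, acc)).2
      = acc ++ pvGen p ds := by
  induction ds with
  | nil => intro p acc; simp [pvGen]
  | cons d ds ih =>
      intro p acc
      simp only [List.foldl, pvGen]
      rw [ih]
      simp

theorem pvA_eq (movements : String) :
    get_visited_houses movements
      = ((PySem.Set.ofList ((0, 0) :: pvGen (0, 0) (movements.toList.map
            (fun move => PySem.Dict.getD defMovements move (0, 0))))).length : Int) := by
  unfold get_visited_houses
  rw [pvA_fold]
  rfl

-- length of a Python set of a list = card of the list's Finset
theorem pvSetLen (l : List (Int × Int)) :
    (PySem.Set.ofList l).length = l.toFinset.card := by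
  have hn : (PySem.Set.ofList l).Nodup := PySem.Set.nodup_ofList l
  have hm : (PySem.Set.ofList l).toFinset = l.toFinset := by
    ext x; simp [List.mem_toFinset, PySem.Set.mem_ofList]
  rw [← List.toFinset_card_of_nodup hn, hm]

-- ===== VERDICT (by name: the statement is the Claim_ definition above) =====
theorem get_visited_houses_spec : Claim_equal_get_visited_houses := by
  intro movements _ _
  unfold Spec_get_visited_houses get_visited_houses_alt
  simp only [pvB_fold]
  set L : List (Int × Int) :=
    (0, 0) :: pvGen (0, 0) (movements.toList.map
      (fun move => PySem.Dict.getD defMovements move (0, 0))) with hL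
  rw [pvA_eq movements]
  have hcons : [((0, 0) : Int × Int)] ++ pvGen (0, 0) (movements.toList.map
      (fun move => PySem.Dict.getD defMovements move (0, 0))) = L := by simp [hL]
  rw [hcons]
  set S := PySem.List.sorted2 L (fun p => p.1) (fun p => p.2) with hS
  have hperm : S.Perm L := PySem.List.sorted2_perm L _ _ false
  have hSne : S ≠ [] := by
    intro h
    have := hperm.length_eq
    rw [h] at this
    simp [hL] at this
  rw [pvZipFold, zero_add, pvBCount_sorted S hSne (pairwise_sorted2 L)]
  have hfin : S.toFinset = L.toFinset := by
    ext z; simp [List.mem_toFinset, hperm.mem_iff]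
  rw [hfin, ← hL, pvSetLen]
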